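-- pv_equiv track=rewrite | github.com/yuzeng2333/pono | scripts/analyze_temporal_patterns.py | vcd_to_trace
-- ===== SOURCE A (Python) =====
-- def vcd_to_trace(waveforms, num_steps=None):
--     """Convert VCD waveforms to step-indexed trace.
--     Returns list of dicts: [{signal: value, ...}, ...]
--     """
--     # find all unique times
--     all_times = sorted(set(t for w in waveforms.values() for t, _ in w))
--     if num_steps and len(all_times) > num_steps:
--         all_times = all_times[:num_steps]
--
--     trace = []
--     current_vals = {}
--     time_idx = 0
--     for step, t in enumerate(all_times):
--         # update values at this time
--         for name, changes in waveforms.items():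
--             for ct, cv in changes:
--                 if ct == t:
--                     current_vals[name] = cv
--         trace.append(dict(current_vals))
--
--     return trace
-- ===== SOURCE B (Python) =====
-- def vcd_to_trace(waveforms, num_steps=None):
--     """Convert VCD waveforms to step-indexed trace.
--     Returns list of dicts: [{signal: value, ...}, ...]
--     """
--     # flatten every change into one event list and sort it by time (stable)
--     events = sorted(
--         ((t, name, v) for name, changes in waveforms.items() for t, v in changes),
--         key=lambda e: e[0])
--
--     # one sweep: consume one run of equal-time events per step, snapshot after each
--     trace = []
--     current = {}
--     i, n = 0, len(events)
--     while i < n: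
--         t = events[i][0]
--         while i < n and events[i][0] == t:
--             current[events[i][1]] = events[i][2]
--             i += 1
--         trace.append(dict(current))
--
--     if num_steps and len(trace) > num_steps:
--         trace = trace[:num_steps]
--     return trace
-- ===== Notes on version B (the rewrite author's own statement) =====
-- stated objective: alternative
-- what changed: Instead of rescanning every waveform's whole change list at every time step, B flattens all changes into one event list, stable-sorts it by time once, and emits one snapshot per run of equal-time events in a single pointer sweep, truncating the finished trace instead of the time list.
import Mathlib
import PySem

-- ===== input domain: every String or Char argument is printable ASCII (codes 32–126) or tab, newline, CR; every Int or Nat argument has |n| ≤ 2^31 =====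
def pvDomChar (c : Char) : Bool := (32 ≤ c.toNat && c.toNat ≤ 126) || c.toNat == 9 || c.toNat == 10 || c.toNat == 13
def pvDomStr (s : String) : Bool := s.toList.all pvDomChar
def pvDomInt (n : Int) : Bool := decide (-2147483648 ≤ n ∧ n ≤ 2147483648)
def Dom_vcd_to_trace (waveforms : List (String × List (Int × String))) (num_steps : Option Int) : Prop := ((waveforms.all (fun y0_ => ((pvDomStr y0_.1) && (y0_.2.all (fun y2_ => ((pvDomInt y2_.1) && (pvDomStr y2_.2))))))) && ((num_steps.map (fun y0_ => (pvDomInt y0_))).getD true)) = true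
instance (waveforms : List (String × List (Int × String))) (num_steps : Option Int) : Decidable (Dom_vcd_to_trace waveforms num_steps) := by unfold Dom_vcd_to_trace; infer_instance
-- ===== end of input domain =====

-- B flattens all changes into one event list, stable-sorts it by time once and emits one
-- snapshot per run of equal-time events in a single sweep (truncating the finished trace),
-- instead of rescanning every change list at every step; return values proved equal.

-- ===== PORT A =====
def vcd_to_trace (waveforms : List (String × List (Int × String))) (num_steps : Option Int) : List (List (String × String)) :=
  -- all_times = sorted(set(t for w in waveforms.values() for t, _ in w))
  let all_times0 := PySem.List.sorted (PySem.Set.ofList (waveforms.flatMap (fun w => w.2.map Prod.fst))) (fun t => t) false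
  -- if num_steps and len(all_times) > num_steps: all_times = all_times[:num_steps]
  let all_times :=
    match num_steps with
    | none => all_times0
    | some n => if n ≠ 0 ∧ (all_times0.length : Int) > n then PySem.List.slice all_times0 none (some n) else all_times0
  -- for step, t in enumerate(all_times): nested rescan of every change list; trace.append(dict(current_vals))
  (all_times.foldl
    (fun (s : List (List (String × String)) × PySem.Dict String String) t =>
      let cv := waveforms.foldl
        (fun cv nc => nc.2.foldl (fun cv c => if c.1 == t then cv.insert nc.1 c.2 else cv) cv) s.2
      (s.1 ++ [cv.items], cv))
    ([], PySem.Dict.empty)).1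

-- ===== PORT B =====
-- inner 'while i < n and events[i][0] == t': consume the run of events at time t, updating current
def pvConsume (t : Int) : List (Int × String × String) → PySem.Dict String String → PySem.Dict String String × List (Int × String × String)
  | [], cv => (cv, [])
  | e :: rest, cv => if e.1 == t then pvConsume t rest (cv.insert e.2.1 e.2.2) else (cv, e :: rest)

theorem pvConsume_len (t : Int) (l : List (Int × String × String)) (cv : PySem.Dict String String) :
    (pvConsume t l cv).2.length ≤ l.length := by
  induction l generalizing cv with
  | nil => simp [pvConsume]
  | cons e rest ih =>
    simp only [pvConsume]
    split
    · exact le_trans (ih _) (Nat.le_succ _)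
    · exact Nat.le_refl _

-- outer 'while i < n': one snapshot per run of equal-time events
def pvSweep : List (Int × String × String) → PySem.Dict String String → List (List (String × String))
  | [], _ => []
  | e :: rest, cv =>
    let r := pvConsume e.1 rest (cv.insert e.2.1 e.2.2)
    r.1.items :: pvSweep r.2 r.1
  termination_by l _ => l.length
  decreasing_by
    simp only [List.length_cons]
    exact Nat.lt_succ_of_le (pvConsume_len _ _ _)

def vcd_to_trace_alt (waveforms : List (String × List (Int × String))) (num_steps : Option Int) : List (List (String × String)) :=
  -- events = sorted(((t, name, v) for name, changes ... for t, v in changes), key=lambda e: e[0])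
  let events := PySem.List.sorted
    (waveforms.flatMap (fun nc => nc.2.map (fun c => (c.1, nc.1, c.2)))) (fun e => e.1) false
  -- the pointer sweep producing one dict snapshot per run of equal times
  let trace := pvSweep events PySem.Dict.empty
  -- if num_steps and len(trace) > num_steps: trace = trace[:num_steps]
  match num_steps with
  | none => trace
  | some n => if n ≠ 0 ∧ (trace.length : Int) > n then PySem.List.slice trace none (some n) else trace

-- ===== PRECONDITION & SPEC =====
def Spec_vcd_to_trace (waveforms : List (String × List (Int × String))) (num_steps : Option Int) (out : List (List (String × String))) : Prop := out = vcd_to_trace_alt waveforms num_steps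
instance (waveforms : List (String × List (Int × String))) (num_steps : Option Int) (out : List (List (String × String))) : Decidable (Spec_vcd_to_trace waveforms num_steps out) := by unfold Spec_vcd_to_trace; infer_instance

-- ===== CLAIM (what is proved, stated in full; the proofs are below) =====
def Claim_equal_vcd_to_trace : Prop := ∀ (waveforms : List (String × List (Int × String))) (num_steps : Option Int), Dom_vcd_to_trace waveforms num_steps → Spec_vcd_to_trace waveforms num_steps (vcd_to_trace waveforms num_steps)

-- ===== LEMMAS AND PROOFS =====

-- the flattened event list, in A's (= B's pre-sort) scan order
def pvE (waveforms : List (String × List (Int × String))) : List (Int × String × String) :=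
  waveforms.flatMap (fun nc => nc.2.map (fun c => (c.1, nc.1, c.2)))

-- the sorted distinct times of an event list
def pvTimes (E : List (Int × String × String)) : List Int :=
  PySem.List.sorted (PySem.Set.ofList (E.map (fun e => e.1))) (fun t => t) false

-- reference: one snapshot per time, updating by the events at that time (in E's order)
def pvSnaps (E : List (Int × String × String)) : List Int → PySem.Dict String String → List (List (String × String))
  | [], _ => []
  | t :: rest, cv =>
    let cv' := (E.filter (fun e => e.1 == t)).foldl (fun cv e => cv.insert e.2.1 e.2.2) cv
    cv'.items :: pvSnaps E rest cv'

-- ---- insertBy facts ----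

theorem pvInsertBy_pass (x : Int × String × String) (as bs : List (Int × String × String))
    (h : ∀ a ∈ as, ¬ x.1 < a.1) :
    PySem.List.insertBy (fun a b => decide (a.1 < b.1)) x (as ++ bs)
      = as ++ PySem.List.insertBy (fun a b => decide (a.1 < b.1)) x bs := by
  induction as with
  | nil => rfl
  | cons a as ih =>
    simp only [List.cons_append, PySem.List.insertBy]
    rw [if_neg (by simpa using h a (by simp)), ih (fun a ha => h a (by simp [ha]))]

theorem pvInsertBy_front (x : Int × String × String) (ys : List (Int × String × String))
    (h : ∀ y ∈ ys, x.1 < y.1) :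
    PySem.List.insertBy (fun a b => decide (a.1 < b.1)) x ys = x :: ys := by
  cases ys with
  | nil => rfl
  | cons y ys =>
    simp only [PySem.List.insertBy]
    rw [if_pos (by simpa using h y (by simp))]

-- inserting an event whose time is already present lands at the END of its run (stability)
theorem pvInsert_mem (ts : List Int) (g : Int → List (Int × String × String))
    (x : Int × String × String)
    (hts : ts.Pairwise (· < ·)) (hmem : x.1 ∈ ts)
    (hkey : ∀ u ∈ ts, ∀ e ∈ g u, e.1 = u) :
    PySem.List.insertBy (fun a b => decide (a.1 < b.1)) x (ts.flatMap g)
      = ts.flatMap (fun u => if u = x.1 then g u ++ [x] else g u) := by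
  induction ts with
  | nil => cases hmem
  | cons u rest ih =>
    have hlt : ∀ v ∈ rest, u < v := (List.pairwise_cons.1 hts).1
    simp only [List.flatMap_cons]
    by_cases hu : u = x.1
    · rw [pvInsertBy_pass x (g u) _ (fun a ha => by
        rw [hkey u (by simp) a ha, hu]; exact lt_irrefl _)]
      rw [pvInsertBy_front x _ (fun y hy => by
        obtain ⟨v, hv, hyv⟩ := List.mem_flatMap.1 hy
        rw [hkey v (by simp [hv]) y hyv, ← hu]; exact hlt v hv)]
      rw [if_pos hu]
      have hrest : rest.flatMap (fun v => if v = x.1 then g v ++ [x] else g v) = rest.flatMap g :=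
        List.flatMap_congr (fun v hv => by
          rw [if_neg]; intro h; rw [h, ← hu] at hv; exact lt_irrefl u (hlt _ hv))
      rw [hrest]
      simp
    · have hx : x.1 ∈ rest := by
        rcases List.mem_cons.1 hmem with h | h
        · exact absurd h.symm hu
        · exact h
      rw [pvInsertBy_pass x (g u) _ (fun a ha => by
        rw [hkey u (by simp) a ha]; exact not_lt.2 (le_of_lt (hlt _ hx)))]
      rw [ih hts.of_cons hx (fun v hv => hkey v (by simp [hv]))]
      rw [if_neg hu]

-- inserting an event with a NEW time: its time is inserted into the time list and it forms its own run
theorem pvInsert_new (ts : List Int) (g : Int → List (Int × String × String))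
    (x : Int × String × String)
    (hts : ts.Pairwise (· < ·)) (hmem : x.1 ∉ ts)
    (hkey : ∀ u ∈ ts, ∀ e ∈ g u, e.1 = u) :
    PySem.List.insertBy (fun a b => decide (a.1 < b.1)) x (ts.flatMap g)
      = (PySem.List.insertBy (fun a b => decide (a < b)) x.1 ts).flatMap
          (fun u => if u = x.1 then [x] else g u) := by
  induction ts with
  | nil => simp [PySem.List.insertBy]
  | cons u rest ih =>
    have hlt : ∀ v ∈ rest, u < v := (List.pairwise_cons.1 hts).1
    have hne : u ≠ x.1 := fun h => hmem (by simp [h])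
    simp only [List.flatMap_cons]
    by_cases h : x.1 < u
    · rw [pvInsertBy_front x _ (fun y hy => by
        rcases List.mem_append.1 hy with hy | hy
        · rw [hkey u (by simp) y hy]; exact h
        · obtain ⟨v, hv, hyv⟩ := List.mem_flatMap.1 hy
          rw [hkey v (by simp [hv]) y hyv]; exact lt_trans h (hlt v hv))]
      have : PySem.List.insertBy (fun a b => decide (a < b)) x.1 (u :: rest) = x.1 :: u :: rest := by
        simp only [PySem.List.insertBy]; rw [if_pos (by simpa using h)]
      rw [this]
      simp only [List.flatMap_cons, if_neg hne]
      have hrest : rest.flatMap (fun v => if v = x.1 then [x] else g v) = rest.flatMap g :=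
        List.flatMap_congr (fun v hv => by
          rw [if_neg]; intro hh; rw [hh] at hv
          exact not_lt.2 (le_of_lt (hlt _ hv)) h)
      rw [hrest]
      simp
    · have hux : u < x.1 := lt_of_le_of_ne (not_lt.1 h) hne
      rw [pvInsertBy_pass x (g u) _ (fun a ha => by
        rw [hkey u (by simp) a ha]; exact h)]
      rw [ih hts.of_cons (fun hh => hmem (by simp [hh])) (fun v hv => hkey v (by simp [hv]))]
      have : PySem.List.insertBy (fun a b => decide (a < b)) x.1 (u :: rest)
          = u :: PySem.List.insertBy (fun a b => decide (a < b)) x.1 rest := by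
        simp only [PySem.List.insertBy]; rw [if_neg (by simpa using not_lt.2 (le_of_lt hux))]
      rw [this]
      simp only [List.flatMap_cons, if_neg hne]

-- pairwise-increasing times (sorted(set(..)))
theorem pvTimes_pairwise (E : List (Int × String × String)) : (pvTimes E).Pairwise (· < ·) :=
  PySem.List.sorted_ofList_pairwise_lt _

theorem pvTimes_mem (E : List (Int × String × String)) (t : Int) : t ∈ pvTimes E ↔ t ∈ E.map (fun e => e.1) := by
  unfold pvTimes
  rw [PySem.List.mem_sorted, PySem.Set.mem_ofList]

-- STABILITY: the stable sort by time is exactly the concatenation of the per-time runs in E's order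
theorem pvSorted_stable (E : List (Int × String × String)) :
    PySem.List.sorted E (fun e => e.1) false
      = (pvTimes E).flatMap (fun t => E.filter (fun e => e.1 == t)) := by
  induction E using List.reverseRecOn with
  | nil => simp [pvTimes, PySem.Set.ofList, PySem.Set.empty, PySem.List.sorted_eq_foldl_insertBy]
  | append_singleton E x ih =>
    have hkey : ∀ u ∈ pvTimes E, ∀ e ∈ E.filter (fun e => e.1 == u), e.1 = u := by
      intro u _ e he
      exact by simpa using (List.of_mem_filter he)
    have hsortstep : PySem.List.sorted (E ++ [x]) (fun e => e.1) false
        = PySem.List.insertBy (fun a b => decide (a.1 < b.1)) x (PySem.List.sorted E (fun e => e.1) false) := by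
      rw [PySem.List.sorted_eq_foldl_insertBy, PySem.List.sorted_eq_foldl_insertBy, List.foldl_append]
      rfl
    have hofl : PySem.Set.ofList ((E ++ [x]).map (fun e => e.1))
        = PySem.Set.add (PySem.Set.ofList (E.map (fun e => e.1))) x.1 := by
      rw [List.map_append, PySem.Set.ofList_eq_foldl, PySem.Set.ofList_eq_foldl, List.foldl_append]
      rfl
    by_cases hmem : x.1 ∈ E.map (fun e => e.1)
    · -- time already present: time list unchanged, x appends to its run
      have htimes : pvTimes (E ++ [x]) = pvTimes E := by
        unfold pvTimes
        rw [hofl, PySem.Set.add]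
        rw [if_pos (by simp [PySem.Set.contains, PySem.Set.mem_ofList, hmem])]
      rw [hsortstep, ih, htimes,
        pvInsert_mem _ _ _ (pvTimes_pairwise E) ((pvTimes_mem E _).2 hmem) hkey]
      apply List.flatMap_congr
      intro u _
      rw [List.filter_append]
      by_cases hu : u = x.1
      · subst hu; simp
      · simp [if_neg hu, (by simpa using Ne.symm hu : ¬ (x.1 == u) = true)]
    · -- new time: it is inserted into the sorted time list and forms the run [x]
      have htimes : pvTimes (E ++ [x])
          = PySem.List.insertBy (fun a b => decide (a < b)) x.1 (pvTimes E) := by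
        unfold pvTimes
        rw [hofl, PySem.Set.add]
        rw [if_neg (by simp [PySem.Set.contains, PySem.Set.mem_ofList, hmem])]
        rw [PySem.List.sorted_eq_foldl_insertBy, PySem.List.sorted_eq_foldl_insertBy, List.foldl_append]
        rfl
      rw [hsortstep, ih, htimes,
        pvInsert_new _ _ _ (pvTimes_pairwise E) (fun h => hmem ((pvTimes_mem E _).1 h)) hkey]
      apply List.flatMap_congr
      intro u hu
      rw [List.filter_append]
      by_cases h : u = x.1
      · subst h
        rw [if_pos rfl]
        rw [List.filter_eq_nil_iff.2 (fun e he => by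
          simp only [beq_iff_eq]
          intro hh; exact hmem (List.mem_map.2 ⟨e, he, hh⟩))]
        simp
      · rw [if_neg h]
        simp [(by simpa using Ne.symm h : ¬ (x.1 == u) = true)]

-- ---- the sweep over the grouped event list is pvSnaps ----

theorem pvConsume_run (t : Int) (as bs : List (Int × String × String)) (cv : PySem.Dict String String)
    (ha : ∀ a ∈ as, a.1 = t) (hb : ∀ b ∈ bs, b.1 ≠ t) :
    pvConsume t (as ++ bs) cv = (as.foldl (fun cv e => cv.insert e.2.1 e.2.2) cv, bs) := by
  induction as generalizing cv with
  | nil =>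
    cases bs with
    | nil => rfl
    | cons b bs =>
      simp only [List.nil_append, pvConsume]
      rw [if_neg (by simpa using hb b (by simp))]
      rfl
  | cons a as ih =>
    simp only [List.cons_append, pvConsume]
    rw [if_pos (by simpa using ha a (by simp))]
    exact ih _ (fun a ha' => ha a (by simp [ha']))

theorem pvSweep_groups (E : List (Int × String × String)) (ts : List Int) (cv : PySem.Dict String String)
    (hts : ts.Pairwise (· < ·))
    (hne : ∀ u ∈ ts, E.filter (fun e => e.1 == u) ≠ []) :
    pvSweep (ts.flatMap (fun t => E.filter (fun e => e.1 == t))) cv = pvSnaps E ts cv := by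
  induction ts generalizing cv with
  | nil => simp [pvSweep, pvSnaps]
  | cons t rest ih =>
    have hlt : ∀ v ∈ rest, t < v := (List.pairwise_cons.1 hts).1
    obtain ⟨e0, es, hg⟩ : ∃ e0 es, E.filter (fun e => e.1 == t) = e0 :: es := by
      cases h : E.filter (fun e => e.1 == t) with
      | nil => exact absurd h (hne t (by simp))
      | cons e0 es => exact ⟨e0, es, rfl⟩
    have he0 : e0.1 = t := by
      have := List.of_mem_filter (p := fun e => e.1 == t) (a := e0) (by rw [hg]; simp)
      simpa using this
    have hes : ∀ a ∈ es, a.1 = t := by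
      intro a ha
      have := List.of_mem_filter (p := fun e => e.1 == t) (a := a) (by rw [hg]; simp [ha])
      simpa using this
    simp only [List.flatMap_cons, hg, List.cons_append]
    rw [pvSweep]
    simp only [he0]
    rw [pvConsume_run t es _ _ hes (fun b hb => by
      obtain ⟨v, hv, hbv⟩ := List.mem_flatMap.1 hb
      have : b.1 = v := by simpa using (List.of_mem_filter hbv)
      rw [this]; exact ne_of_gt (hlt v hv))]
    simp only [pvSnaps, hg, List.foldl_cons]
    rw [ih _ hts.of_cons (fun u hu => hne u (by simp [hu]))]

-- ---- A's loop is pvSnaps too ----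

theorem pvStepA_eq (waveforms : List (String × List (Int × String))) (t : Int) (cv : PySem.Dict String String) :
    waveforms.foldl
      (fun cv nc => nc.2.foldl (fun cv c => if c.1 == t then cv.insert nc.1 c.2 else cv) cv) cv
    = ((pvE waveforms).filter (fun e => e.1 == t)).foldl (fun cv e => cv.insert e.2.1 e.2.2) cv := by
  induction waveforms generalizing cv with
  | nil => rfl
  | cons nc rest ih =>
    simp only [List.foldl_cons, pvE, List.flatMap_cons, List.filter_append, List.foldl_append]
    rw [ih]
    congr 1
    rw [PySem.List.foldl_if_eq_foldl_filter, List.filter_map]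
    have : ((fun e : Int × String × String => e.1 == t) ∘ fun c : Int × String => (c.1, nc.1, c.2))
        = fun c : Int × String => c.1 == t := rfl
    rw [this, List.foldl_map]

theorem pvFoldA_eq (waveforms : List (String × List (Int × String))) (ts : List Int)
    (acc : List (List (String × String))) (cv : PySem.Dict String String) :
    (ts.foldl
      (fun (s : List (List (String × String)) × PySem.Dict String String) t =>
        let cv := waveforms.foldl
          (fun cv nc => nc.2.foldl (fun cv c => if c.1 == t then cv.insert nc.1 c.2 else cv) cv) s.2
        (s.1 ++ [cv.items], cv))
      (acc, cv)).1
    = acc ++ pvSnaps (pvE waveforms) ts cv := by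
  induction ts generalizing acc cv with
  | nil => simp [pvSnaps]
  | cons t rest ih =>
    simp only [List.foldl_cons, pvSnaps]
    rw [ih, pvStepA_eq]
    simp

-- ---- bookkeeping: lengths, take, time lists ----

theorem pvSnaps_length (E : List (Int × String × String)) (ts : List Int) (cv : PySem.Dict String String) :
    (pvSnaps E ts cv).length = ts.length := by
  induction ts generalizing cv with
  | nil => rfl
  | cons t rest ih => simp only [pvSnaps, List.length_cons]; rw [ih]

theorem pvSnaps_take (E : List (Int × String × String)) (ts : List Int) (k : Nat) (cv : PySem.Dict String String) :
    pvSnaps E (ts.take k) cv = (pvSnaps E ts cv).take k := by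
  induction ts generalizing k cv with
  | nil => simp [pvSnaps]
  | cons t rest ih =>
    cases k with
    | zero => simp [pvSnaps]
    | succ k => simp only [List.take_succ_cons, pvSnaps]; rw [ih]

theorem pvTimes_eq (waveforms : List (String × List (Int × String))) :
    PySem.Set.ofList (waveforms.flatMap (fun w => w.2.map Prod.fst))
      = PySem.Set.ofList ((pvE waveforms).map (fun e => e.1)) := by
  congr 1
  unfold pvE
  rw [List.map_flatMap]
  apply List.flatMap_congr
  intro nc _
  simp

theorem pvSlice_take {α : Type} (xs : List α) (n : Int) :
    PySem.List.slice xs none (some n) = xs.take (PySem.List.clampIdx xs.length n) := by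
  simp [PySem.List.slice]

-- B's full trace equals pvSnaps over all sorted distinct times
theorem pvTrace_eq (waveforms : List (String × List (Int × String))) :
    pvSweep (PySem.List.sorted
        (waveforms.flatMap (fun nc => nc.2.map (fun c => (c.1, nc.1, c.2)))) (fun e => e.1) false)
      PySem.Dict.empty
    = pvSnaps (pvE waveforms) (pvTimes (pvE waveforms)) PySem.Dict.empty := by
  rw [show waveforms.flatMap (fun nc => nc.2.map (fun c => (c.1, nc.1, c.2))) = pvE waveforms from rfl]
  rw [pvSorted_stable]
  exact pvSweep_groups _ _ _ (pvTimes_pairwise _) (fun u hu => by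
    rw [Ne, List.filter_eq_nil_iff]
    intro h
    obtain ⟨e, he, hue⟩ := List.mem_map.1 ((pvTimes_mem _ _).1 hu)
    exact h e he (by simp [hue]))

-- ===== VERDICT (by name: the statement is the Claim_ definition above) =====
theorem vcd_to_trace_spec : Claim_equal_vcd_to_trace := by
  intro waveforms num_steps _
  show vcd_to_trace waveforms num_steps = vcd_to_trace_alt waveforms num_steps
  simp only [vcd_to_trace, vcd_to_trace_alt]
  rw [pvTrace_eq]
  rw [show PySem.List.sorted (PySem.Set.ofList (waveforms.flatMap (fun w => w.2.map Prod.fst))) (fun t => t) false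
      = pvTimes (pvE waveforms) by unfold pvTimes; rw [pvTimes_eq]]
  cases num_steps with
  | none => exact pvFoldA_eq waveforms _ [] PySem.Dict.empty
  | some n =>
    simp only [pvSnaps_length]
    by_cases h : n ≠ 0 ∧ ((pvTimes (pvE waveforms)).length : Int) > n
    · rw [if_pos h, if_pos h]
      rw [pvFoldA_eq waveforms _ [] PySem.Dict.empty, List.nil_append]
      rw [pvSlice_take, pvSlice_take, pvSnaps_take, pvSnaps_length]
    · rw [if_neg h, if_neg h]
      exact pvFoldA_eq waveforms _ [] PySem.Dict.empty
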